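-- pv_equiv track=rewrite | github.com/whyj107/CodeWar | 20230802_Replace every nth.py | replace_nth1
-- ===== SOURCE A (Python) =====
-- def replace_nth1(text, n, old, new):
--     count = 0
--     res = ""
--     for c in text:
--         if c==old:
--             count+=1
--             if count ==n:
--                 res+=new
--                 count=0
--                 continue
--         res+=c
--     return res
-- ===== SOURCE B (Python) =====
-- def replace_nth1(text, n, old, new):
--     if n >= 1:
--         matches = [i for i, c in enumerate(text) if c == old]
--         targets = {i for r, i in enumerate(matches) if (r + 1) % n == 0}
--     else:
--         targets = set()
--     return ''.join(new if i in targets else c for i, c in enumerate(text))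
-- ===== Notes on version B (the rewrite author's own statement) =====
-- stated objective: alternative
-- what changed: A's single interleaved loop carrying a wrap-around counter and a growing string is replaced by two separate passes: first collect the indices of matching characters and select every nth of them into a set, then emit the output by mapping over enumerate(text) and joining the pieces.
import Mathlib
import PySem

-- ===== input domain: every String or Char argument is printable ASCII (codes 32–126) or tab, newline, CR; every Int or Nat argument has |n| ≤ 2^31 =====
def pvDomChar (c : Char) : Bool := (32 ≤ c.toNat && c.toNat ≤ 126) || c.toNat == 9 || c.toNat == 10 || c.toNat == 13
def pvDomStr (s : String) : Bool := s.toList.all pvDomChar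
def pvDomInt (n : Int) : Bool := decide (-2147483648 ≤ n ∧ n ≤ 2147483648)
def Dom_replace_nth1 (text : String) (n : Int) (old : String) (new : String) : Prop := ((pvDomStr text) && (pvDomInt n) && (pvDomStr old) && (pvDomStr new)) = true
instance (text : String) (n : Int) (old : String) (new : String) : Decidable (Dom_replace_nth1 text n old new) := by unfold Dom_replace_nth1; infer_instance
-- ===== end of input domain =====

-- B replaces A's single counting loop by two passes (collect the match positions, pick every
-- nth as a set, then emit with a join); objective: alternative decomposition, same cost.

-- B replaces A's single interleaved counting loop by two passes: collect the positions of the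
-- matching characters, select every nth of them into a set, then emit the output with a join.
-- Objective: alternative decomposition, same asymptotic cost. (A's return value only; no mutation.)

-- ===== PORT A =====
-- one loop step of A: if c==old: count+=1; if count==n: res+=new, count=0, continue; res+=c
def stepA (n : Int) (ol nl : List Char) (st : Int × List Char) (c : Char) : Int × List Char :=
  if [c] = ol then
    if st.1 + 1 = n then (0, st.2 ++ nl)
    else (st.1 + 1, st.2 ++ [c])
  else (st.1, st.2 ++ [c])

def replace_nth1 (text : String) (n : Int) (old : String) (new : String) : String :=
  String.ofList (text.toList.foldl (stepA n old.toList new.toList) (0, [])).2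

-- ===== PORT B =====
-- matches = [i for i, c in enumerate(text) if c == old]
def msL (ol : List Char) (cs : List Char) (i0 : Int) : List Int :=
  ((PySem.List.enumerate cs i0).filter (fun p => [p.2] = ol)).map Prod.fst

-- targets = {i for r, i in enumerate(matches) if (r + 1) % n == 0}
def tgtL (n : Int) (ms : List Int) : PySem.Set Int :=
  PySem.Set.ofList
    (((PySem.List.enumerate ms 0).filter (fun p => PySem.Int.mod (p.1 + 1) n = 0)).map Prod.snd)

-- ''.join(new if i in targets else c for i, c in enumerate(text))
def replace_nth1_alt (text : String) (n : Int) (old : String) (new : String) : String :=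
  let targets : PySem.Set Int :=
    if 1 ≤ n then tgtL n (msL old.toList text.toList 0) else PySem.Set.empty
  PySem.Str.join "" ((PySem.List.enumerate text.toList 0).map
    (fun p => if p.1 ∈ targets then new else String.ofList [p.2]))

-- ===== PRECONDITION & SPEC =====
def Spec_replace_nth1 (text : String) (n : Int) (old : String) (new : String) (out : String) : Prop := out = replace_nth1_alt text n old new
instance (text : String) (n : Int) (old : String) (new : String) (out : String) : Decidable (Spec_replace_nth1 text n old new out) := by unfold Spec_replace_nth1; infer_instance

-- ===== CLAIM (what is proved, stated in full; the proofs are below) =====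
def Claim_equal_replace_nth1 : Prop := ∀ (text : String) (n : Int) (old : String) (new : String), Dom_replace_nth1 text n old new → Spec_replace_nth1 text n old new (replace_nth1 text n old new)

-- ===== LEMMAS AND PROOFS =====

-- reference emitter: the k-th (0-based rank) matching char is replaced iff (rank+1) % n == 0
def emitR (n : Int) (ol nl : List Char) : List Char → Nat → List Char
  | [], _ => []
  | c :: cs, k =>
    if [c] = ol then (if ((k : Int) + 1) % n = 0 then nl else [c]) ++ emitR n ol nl cs (k + 1)
    else c :: emitR n ol nl cs k

theorem mod_succ (n k : Int) (hn : 0 < n) :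
    (k + 1) % n = if k % n + 1 = n then 0 else k % n + 1 := by
  have hd : k + 1 = (k % n + 1) + n * (k / n) := by
    have := Int.mul_ediv_add_emod k n; linarith
  rw [hd, Int.add_mul_emod_self_left]
  split_ifs with h
  · rw [h]; simp
  · have h0 : 0 ≤ k % n := Int.emod_nonneg k (by omega)
    have h1 : k % n < n := Int.emod_lt_of_pos k hn
    exact Int.emod_eq_of_lt (by omega) (by omega)

theorem A_emit (n : Int) (hn : 0 < n) (ol nl : List Char) (cs : List Char) :
    ∀ (k : Nat) (res : List Char),
      (cs.foldl (stepA n ol nl) ((k : Int) % n, res)).2 = res ++ emitR n ol nl cs k := by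
  induction cs with
  | nil => intro k res; simp [emitR]
  | cons c cs ih =>
    intro k res
    have h0 : 0 ≤ (k : Int) % n := Int.emod_nonneg _ (by omega)
    have h1 : (k : Int) % n < n := Int.emod_lt_of_pos _ hn
    have hms := mod_succ n (k : Int) hn
    by_cases hc : [c] = ol
    · by_cases hit : ((k : Int) + 1) % n = 0
      · have heq : (k : Int) % n + 1 = n := by
          by_contra h; rw [hms] at hit; simp [h] at hit; omega
        have hz : ((k + 1 : Nat) : Int) % n = 0 := by
          push_cast; rw [mod_succ n _ hn]; simp [heq]
        rw [List.foldl_cons,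
          show stepA n ol nl ((k : Int) % n, res) c = (((k + 1 : Nat) : Int) % n, res ++ nl) by
            simp only [stepA]; rw [if_pos hc, if_pos heq, hz],
          ih (k + 1) (res ++ nl)]
        rw [emitR, if_pos hc, if_pos hit, List.append_assoc]
      · have hne : (k : Int) % n + 1 ≠ n := by
          intro h; rw [hms] at hit; simp [h] at hit
        have hst : (k : Int) % n + 1 = ((k + 1 : Nat) : Int) % n := by
          push_cast; rw [mod_succ n _ hn]; simp [hne]
        rw [List.foldl_cons,
          show stepA n ol nl ((k : Int) % n, res) c = (((k + 1 : Nat) : Int) % n, res ++ [c]) by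
            simp only [stepA]; rw [if_pos hc, if_neg hne, hst],
          ih (k + 1) (res ++ [c])]
        rw [emitR, if_pos hc, if_neg hit, List.append_assoc]
    · rw [List.foldl_cons,
        show stepA n ol nl ((k : Int) % n, res) c = ((k : Int) % n, res ++ [c]) by
          simp only [stepA]; rw [if_neg hc],
        ih k (res ++ [c])]
      rw [emitR, if_neg hc]
      simp

theorem A_id (n : Int) (hn : n ≤ 0) (ol nl : List Char) (cs : List Char) :
    ∀ (k : Int) (res : List Char), 0 ≤ k →
      (cs.foldl (stepA n ol nl) (k, res)).2 = res ++ cs := by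
  induction cs with
  | nil => intro k res _; simp
  | cons c cs ih =>
    intro k res hk
    by_cases hc : [c] = ol
    · have hne : k + 1 ≠ n := by omega
      rw [List.foldl_cons,
        show stepA n ol nl (k, res) c = (k + 1, res ++ [c]) by simp only [stepA]; rw [if_pos hc, if_neg hne],
        ih (k + 1) (res ++ [c]) (by omega)]
      simp
    · rw [List.foldl_cons,
        show stepA n ol nl (k, res) c = (k, res ++ [c]) by simp only [stepA]; rw [if_neg hc],
        ih k (res ++ [c]) hk]
      simp

theorem msL_cons (ol : List Char) (c : Char) (cs : List Char) (i0 : Int) :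
    msL ol (c :: cs) i0 = (if [c] = ol then [i0] else []) ++ msL ol cs (i0 + 1) := by
  by_cases hc : [c] = ol <;>
    simp [msL, PySem.List.enumerate_cons, hc]

theorem msL_bounds (ol : List Char) (cs : List Char) :
    ∀ (i0 : Int), ∀ x ∈ msL ol cs i0, i0 ≤ x := by
  induction cs with
  | nil => intro i0 x hx; simp [msL] at hx
  | cons c cs ih =>
    intro i0 x hx
    rw [msL_cons] at hx
    rcases List.mem_append.1 hx with h | h
    · split at h <;> simp_all
    · have := ih (i0 + 1) x h; omega

theorem mem_tgtL (n : Int) (ms : List Int) (i : Int) :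
    i ∈ tgtL n ms ↔ ∃ (k : Nat) (h : k < ms.length), ms[k] = i ∧ PySem.Int.mod ((k : Int) + 1) n = 0 := by
  rw [tgtL, PySem.Set.mem_ofList]
  simp only [List.mem_map, List.mem_filter, PySem.List.mem_enumerate_iff]
  constructor
  · rintro ⟨p, ⟨⟨k, hk, rfl⟩, hmod⟩, rfl⟩
    exact ⟨k, hk, rfl, by simpa using hmod⟩
  · rintro ⟨k, hk, rfl, hmod⟩
    exact ⟨((k : Int), ms[k]), ⟨⟨k, hk, by simp⟩, by simpa using hmod⟩, rfl⟩

theorem getElem_mid (pre rest : List Int) (i0 : Int) (k : Nat)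
    (hk : k < ((pre ++ [i0]) ++ rest).length)
    (hpre : ∀ x ∈ pre, x < i0) (hrest : ∀ x ∈ rest, i0 < x) :
    ((pre ++ [i0]) ++ rest)[k] = i0 ↔ k = pre.length := by
  simp only [List.length_append, List.length_cons, List.length_nil] at hk
  rcases Nat.lt_trichotomy k pre.length with hlt | heq | hgt
  · have h1 : k < (pre ++ [i0]).length := by simp; omega
    rw [List.getElem_append_left h1, List.getElem_append_left hlt]
    have := hpre pre[k] (List.getElem_mem _)
    constructor
    · intro h; omega
    · intro h; omega
  · subst heq
    have h1 : pre.length < (pre ++ [i0]).length := by simp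
    rw [List.getElem_append_left h1]
    simp
  · have h1 : (pre ++ [i0]).length ≤ k := by simp; omega
    have hv : k - (pre ++ [i0]).length < rest.length := by simp; omega
    have := hrest (rest[k - (pre ++ [i0]).length]'hv) (List.getElem_mem _)
    rw [List.getElem_append_right h1]
    constructor
    · intro h; omega
    · intro h; omega

theorem B_emit (n : Int) (hn : 0 < n) (ol nl : List Char) :
    ∀ (cs : List Char) (i0 : Int) (pre : List Int), (∀ x ∈ pre, x < i0) →
      ((PySem.List.enumerate cs i0).flatMap
        (fun p => if p.1 ∈ tgtL n (pre ++ msL ol cs i0) then nl else [p.2]))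
      = emitR n ol nl cs pre.length := by
  intro cs
  induction cs with
  | nil => intro i0 pre hpre; simp [emitR]
  | cons c cs ih =>
    intro i0 pre hpre
    rw [PySem.List.enumerate_cons, List.flatMap_cons]
    have hrest : ∀ x ∈ msL ol cs (i0 + 1), i0 < x := by
      intro x hx; have := msL_bounds ol cs (i0 + 1) x hx; omega
    by_cases hc : [c] = ol
    · have hL : pre ++ msL ol (c :: cs) i0 = (pre ++ [i0]) ++ msL ol cs (i0 + 1) := by
        rw [msL_cons, if_pos hc, List.append_assoc]
    -- membership of i0 in the target set is exactly "(rank + 1) % n == 0"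
      have hmem : i0 ∈ tgtL n (pre ++ msL ol (c :: cs) i0) ↔
          PySem.Int.mod ((pre.length : Int) + 1) n = 0 := by
        rw [hL, mem_tgtL]
        constructor
        · rintro ⟨k, hk, hki, hmod⟩
          have : k = pre.length := (getElem_mid pre _ i0 k hk hpre hrest).1 hki
          subst this
          simpa using hmod
        · intro hmod
          have hk : pre.length < ((pre ++ [i0]) ++ msL ol cs (i0 + 1)).length := by simp
          exact ⟨pre.length, hk, (getElem_mid pre _ i0 pre.length hk hpre hrest).2 rfl, hmod⟩
      have htail : pre ++ msL ol (c :: cs) i0 = (pre ++ [i0]) ++ msL ol cs (i0 + 1) := hL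
      rw [emitR, if_pos hc]
      by_cases hmod : PySem.Int.mod ((pre.length : Int) + 1) n = 0
      · rw [if_pos (hmem.2 hmod), if_pos (by rw [← PySem.Int.mod_eq_emod_of_pos hn]; exact hmod)]
        congr 1
        rw [htail, ih (i0 + 1) (pre ++ [i0]) (by intro x hx; rcases List.mem_append.1 hx with h | h
                                                 · have := hpre x h; omega
                                                 · simp at h; omega)]
        simp
      · rw [if_neg (fun h => hmod (hmem.1 h)),
            if_neg (by rw [← PySem.Int.mod_eq_emod_of_pos hn]; exact hmod)]
        congr 1
        rw [htail, ih (i0 + 1) (pre ++ [i0]) (by intro x hx; rcases List.mem_append.1 hx with h | h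
                                                 · have := hpre x h; omega
                                                 · simp at h; omega)]
        simp
    · have hL : pre ++ msL ol (c :: cs) i0 = pre ++ msL ol cs (i0 + 1) := by
        rw [msL_cons, if_neg hc]; rfl
      have hnot : i0 ∉ tgtL n (pre ++ msL ol (c :: cs) i0) := by
        rw [hL, mem_tgtL]
        rintro ⟨k, hk, hki, -⟩
        have hm : i0 ∈ pre ++ msL ol cs (i0 + 1) := by
          have hmem' := List.getElem_mem hk; rw [hki] at hmem'; exact hmem'
        rcases List.mem_append.1 hm with h | h
        · have := hpre _ h; omega
        · have := hrest _ h; omega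
      rw [emitR, if_neg hc, if_neg hnot]
      rw [hL, ih (i0 + 1) pre (fun x hx => by have := hpre x hx; omega)]
      rfl

theorem join_empty (css : List (List Char)) : PySem.Chars.join [] css = css.flatten := by
  show [].intercalate css = css.flatten
  induction css with
  | nil => rfl
  | cons c cs ih => cases cs <;> simp_all [List.intercalate, List.intersperse]

-- B's string, seen as a char list, is the flatMap of its per-character pieces
theorem B_toList (text : String) (n : Int) (old : String) (new : String) :
    (replace_nth1_alt text n old new).toList =
      (PySem.List.enumerate text.toList 0).flatMap
        (fun p => if p.1 ∈ (if 1 ≤ n then tgtL n (msL old.toList text.toList 0) else PySem.Set.empty)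
                  then new.toList else [p.2]) := by
  rw [replace_nth1_alt, PySem.Str.toList_join,
    show ("".toList : List Char) = [] from rfl, join_empty]
  rw [List.map_map, List.flatMap]
  congr 1
  apply List.map_congr_left
  intro p _
  rw [Function.comp_apply, apply_ite String.toList, String.toList_ofList]

theorem flatMap_snd (l : List (Int × Char)) : l.flatMap (fun p => [p.2]) = l.map (·.2) := by
  induction l with
  | nil => rfl
  | cons x xs ih => simp [List.flatMap_cons, ih]

-- n < 1: B's target set is empty, so B is the identity on the text
theorem B_id (text : String) (n : Int) (old : String) (new : String) (hn : ¬ 1 ≤ n) :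
    (replace_nth1_alt text n old new).toList = text.toList := by
  rw [B_toList, if_neg hn]
  have h1 : ∀ p : Int × Char,
      (if p.1 ∈ PySem.Set.empty then new.toList else [p.2]) = [p.2] := by
    intro p; simp [PySem.Set.empty]
  calc (PySem.List.enumerate text.toList 0).flatMap
          (fun p => if p.1 ∈ PySem.Set.empty then new.toList else [p.2])
      = (PySem.List.enumerate text.toList 0).flatMap (fun p => [p.2]) := by
        apply List.flatMap_congr; intro p _; exact h1 p
    _ = (PySem.List.enumerate text.toList 0).map (·.2) := flatMap_snd _
    _ = text.toList := PySem.List.map_snd_enumerate _ _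

-- ===== VERDICT (by name: the statement is the Claim_ definition above) =====
theorem replace_nth1_spec : Claim_equal_replace_nth1 := by
  intro text n old new _
  show replace_nth1 text n old new = replace_nth1_alt text n old new
  apply String.toList_inj.mp
  rw [replace_nth1, String.toList_ofList]
  by_cases hn : 1 ≤ n
  · rw [show ((0 : Int), ([] : List Char)) = (((0 : Nat) : Int) % n, ([] : List Char)) by simp]
    rw [A_emit n (by omega) old.toList new.toList text.toList 0 [], List.nil_append]
    rw [B_toList, if_pos hn]
    have hB := B_emit n (by omega) old.toList new.toList text.toList 0 [] (by simp)
    rw [List.nil_append] at hB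
    rw [hB]
    rfl
  · rw [A_id n (by omega) old.toList new.toList text.toList 0 [] le_rfl, List.nil_append]
    rw [B_id text n old new hn]
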